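-- pv_equiv track=rewrite | github.com/sebadevo/scrabble | src/scrabble/main.py | localisation_lettre_sur_plateau
-- ===== SOURCE A (Python) =====
-- def localisation_lettre_sur_plateau(coup, plateau):
--     """
--     Cette fonction renvoie la position des lettre déjà présente sur le plateau à l'endroit où l'on va vouloir mettre un
--     mot.
--
--     Args:
--         - coup (tuple): un tuple à 3 éléments:
--             - mot (str): une chaine de caractère en majuscule qui indique le mot à placer
--             - pos (tuple) : un tuple d'entiers (l,c) qui indiquent le numéro de ligne (l), et le numéro de la colonne
--             (c) de la première lettre du mot à placer.
--             - dir (str) : un charactère ("h" ou "v") qui indique la direction du mot.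
--         - plateau (liste) : une liste de 15 sous-listes qui représentent chacune une ligne du plateau de jeu. Elles
--         contiennent chacune, soit un underscore pour indiquer que la case est vide, soit une lettre si elle a déjà été
--         placée là auparavant.
--
--     Valeur de retour:
--         position (list) : une liste de tuple correspondant aux positions des lettres déjà présentes sur le plateau à
--         l'emplacement du mot qui va être placé.
--
--     Examples:
--     >>> coup = ("DES", (6,7), "V")
--     >>> plateau = [
--         ["_","_","_","_","_","_","_","_","_","_","_","_","_","_","_"],
--         ["_","_","_","_","_","_","_","_","_","_","_","_","_","_","_"],
--         ["_","_","_","_","_","_","_","_","_","_","_","_","_","_","_"],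
--         ["_","_","_","_","_","_","_","_","_","_","_","_","_","_","_"],
--         ["_","_","_","_","_","_","_","_","_","_","_","_","_","_","_"],
--         ["_","_","_","_","_","_","_","_","_","_","_","_","_","_","_"],
--         ["_","_","_","_","_","_","_","_","_","_","_","_","_","_","_"],
--         ["_","_","_","_","_","_","_","E","S","P","O","I","R","_","_"],
--         ["_","_","_","_","_","_","_","_","_","_","_","_","_","_","_"],
--         ["_","_","_","_","_","_","_","_","_","_","_","_","_","_","_"],
--         ["_","_","_","_","_","_","_","_","_","_","_","_","_","_","_"],
--         ["_","_","_","_","_","_","_","_","_","_","_","_","_","_","_"],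
--         ["_","_","_","_","_","_","_","_","_","_","_","_","_","_","_"],
--         ["_","_","_","_","_","_","_","_","_","_","_","_","_","_","_"],
--         ["_","_","_","_","_","_","_","_","_","_","_","_","_","_","_"],
--     ]
--     >>> localisation_lettre_sur_plateau(coup, plateau)
--     [(7,7)]
--     """
--     mot, pos, direc = coup
--     line, column = pos
--     position = []
--     if direc == "V":
--         for i in range(len(mot)):
--             if plateau[line + i][column] != "_":
--                 position.append((line + i, column))
--     elif direc == "H":
--         for i in range(len(mot)):
--             if plateau[line][column + i] != "_":
--                 position.append((line, column + i))
--     return position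
-- ===== SOURCE B (Python) =====
-- def localisation_lettre_sur_plateau(coup, plateau):
--     mot, (line, column), direc = coup
--     if direc != "V" and direc != "H":
--         return []
--     return _scan(list(mot), line, column, direc, plateau)
--
--
-- def _scan(letters, r, c, direc, plateau):
--     # recursion on the word: thread the current coordinate, cons occupied cells
--     if not letters:
--         return []
--     if direc == "V":
--         nr, nc = r + 1, c
--     else:
--         nr, nc = r, c + 1
--     rest = _scan(letters[1:], nr, nc, direc, plateau)
--     if plateau[r][c] != "_":
--         return [(r, c)] + rest
--     return rest
-- ===== Notes on version B (the rewrite author's own statement) =====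
-- stated objective: alternative
-- what changed: B replaces A's two index-driven loops (range(len(mot)) with an append accumulator) by a single structural recursion on the word that threads the current coordinate as state and builds the result front-to-back by consing around the recursive call; no indices, no range, no accumulator.
import Mathlib
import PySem

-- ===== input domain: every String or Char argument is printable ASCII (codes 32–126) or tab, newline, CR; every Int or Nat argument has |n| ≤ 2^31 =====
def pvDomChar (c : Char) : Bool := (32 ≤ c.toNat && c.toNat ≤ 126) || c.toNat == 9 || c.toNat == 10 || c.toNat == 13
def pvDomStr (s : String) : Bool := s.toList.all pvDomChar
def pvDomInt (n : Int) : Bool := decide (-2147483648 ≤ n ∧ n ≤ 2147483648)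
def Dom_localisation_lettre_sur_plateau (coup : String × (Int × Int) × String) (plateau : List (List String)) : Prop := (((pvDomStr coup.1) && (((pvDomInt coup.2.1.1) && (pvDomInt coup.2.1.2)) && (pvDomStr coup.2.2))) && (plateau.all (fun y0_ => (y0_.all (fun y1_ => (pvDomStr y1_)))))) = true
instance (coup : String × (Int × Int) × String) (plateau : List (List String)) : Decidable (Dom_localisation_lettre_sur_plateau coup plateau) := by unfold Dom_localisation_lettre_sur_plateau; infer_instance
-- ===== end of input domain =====

-- B replaces A's two index-driven append loops by one structural recursion on the word that
-- threads the current coordinate and conses occupied cells (objective: alternative decomposition).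

-- ===== PORT A =====
-- literal port of A: two direction branches, each a loop over range(len(mot)) appending occupied positions.
-- plateau[...] is ported with pyGetD; its defaults are only reached outside Pre_ (where Python raises IndexError).
def localisation_lettre_sur_plateau (coup : String × (Int × Int) × String) (plateau : List (List String)) : List (Int × Int) :=
  let mot := coup.1
  let line := coup.2.1.1
  let column := coup.2.1.2
  let direc := coup.2.2
  if direc = "V" then
    (List.range mot.toList.length).foldl (fun position (i : Nat) =>
      if PySem.List.pyGetD (PySem.List.pyGetD plateau (line + (i : Int)) []) column "_" != "_" then
        position ++ [(line + (i : Int), column)]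
      else position) []
  else if direc = "H" then
    (List.range mot.toList.length).foldl (fun position (i : Nat) =>
      if PySem.List.pyGetD (PySem.List.pyGetD plateau line []) (column + (i : Int)) "_" != "_" then
        position ++ [(line, column + (i : Int))]
      else position) []
  else []

-- ===== PORT B =====
-- literal port of Source B's _scan: recursion on the word, threading the coordinate, consing occupied cells.
-- (letters[1:] on a nonempty list is its tail.)
def pvScan (letters : List Char) (r c : Int) (direc : String) (plateau : List (List String)) : List (Int × Int) :=
  match letters with
  | [] => []
  | _ :: tl =>
    let nrc : Int × Int := if direc = "V" then (r + 1, c) else (r, c + 1)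
    let rest := pvScan tl nrc.1 nrc.2 direc plateau
    if PySem.List.pyGetD (PySem.List.pyGetD plateau r []) c "_" != "_" then (r, c) :: rest
    else rest

def localisation_lettre_sur_plateau_alt (coup : String × (Int × Int) × String) (plateau : List (List String)) : List (Int × Int) :=
  let mot := coup.1
  let line := coup.2.1.1
  let column := coup.2.1.2
  let direc := coup.2.2
  if direc ≠ "V" ∧ direc ≠ "H" then []
  else pvScan mot.toList line column direc plateau

-- ===== PRECONDITION & SPEC =====
-- Pre_ excludes exactly the inputs where Python A raises IndexError: every board access the
-- chosen direction performs must be in (Python, sign-aware) range.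
def Pre_localisation_lettre_sur_plateau (coup : String × (Int × Int) × String) (plateau : List (List String)) : Prop :=
  (coup.2.2 = "V" → ∀ i ∈ List.range coup.1.toList.length,
     PySem.Raise.InRange plateau.length (coup.2.1.1 + (i : Int)) ∧
     PySem.Raise.InRange (PySem.List.pyGetD plateau (coup.2.1.1 + (i : Int)) []).length coup.2.1.2) ∧
  (coup.2.2 = "H" → ∀ i ∈ List.range coup.1.toList.length,
     PySem.Raise.InRange plateau.length coup.2.1.1 ∧
     PySem.Raise.InRange (PySem.List.pyGetD plateau coup.2.1.1 []).length (coup.2.1.2 + (i : Int)))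
instance (coup : String × (Int × Int) × String) (plateau : List (List String)) : Decidable (Pre_localisation_lettre_sur_plateau coup plateau) := by unfold Pre_localisation_lettre_sur_plateau; infer_instance

def pvWitness_localisation_lettre_sur_plateau : (String × (Int × Int) × String) × List (List String) :=
  (("AB", (0, 0), "V"), [["X"], ["_"]])

def Spec_localisation_lettre_sur_plateau (coup : String × (Int × Int) × String) (plateau : List (List String)) (out : List (Int × Int)) : Prop := out = localisation_lettre_sur_plateau_alt coup plateau
instance (coup : String × (Int × Int) × String) (plateau : List (List String)) (out : List (Int × Int)) : Decidable (Spec_localisation_lettre_sur_plateau coup plateau out) := by unfold Spec_localisation_lettre_sur_plateau; infer_instance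

-- ===== CLAIM (what is proved, stated in full; the proofs are below) =====
def Claim_equal_localisation_lettre_sur_plateau : Prop := ∀ (coup : String × (Int × Int) × String) (plateau : List (List String)), Dom_localisation_lettre_sur_plateau coup plateau → Pre_localisation_lettre_sur_plateau coup plateau → Spec_localisation_lettre_sur_plateau coup plateau (localisation_lettre_sur_plateau coup plateau)

-- ===== LEMMAS AND PROOFS =====

-- A's append-if loop over a list of indices equals the filtered map of those indices.
theorem pvLoopEq (f : Nat → Int × Int) (q : Int × Int → Bool) (l : List Nat) (acc : List (Int × Int)) :
    l.foldl (fun position i => if q (f i) then position ++ [f i] else position) acc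
      = acc ++ (l.map f).filter q := by
  induction l generalizing acc with
  | nil => simp
  | cons x xs ih =>
      simp only [List.foldl_cons, List.map_cons, List.filter_cons]
      cases h : q (f x) <;> simp [ih]

-- B's recursion in direction "V" equals the filtered map of the vertical coordinates.
theorem pvScanV (plateau : List (List String)) (letters : List Char) (r c : Int) :
    pvScan letters r c "V" plateau
      = ((List.range letters.length).map (fun i : Nat => (r + (i : Int), c))).filter
          (fun rc => PySem.List.pyGetD (PySem.List.pyGetD plateau rc.1 []) rc.2 "_" != "_") := by
  induction letters generalizing r with
  | nil => simp [pvScan]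
  | cons x tl ih =>
      simp only [pvScan, List.length_cons, List.range_succ_eq_map, List.map_cons, List.map_map,
        List.filter_cons, String.reduceEq, reduceIte, Nat.cast_zero, add_zero]
      rw [ih (r + 1)]
      have : ((List.range tl.length).map (fun i : Nat => (r + 1 + (i : Int), c)))
           = ((List.range tl.length).map ((fun i : Nat => (r + (i : Int), c)) ∘ Nat.succ)) := by
        refine List.map_congr_left (fun a _ => ?_)
        simp [Function.comp]; push_cast; ring
      rw [this]

-- B's recursion in direction "H" equals the filtered map of the horizontal coordinates.
theorem pvScanH (plateau : List (List String)) (letters : List Char) (r c : Int) :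
    pvScan letters r c "H" plateau
      = ((List.range letters.length).map (fun i : Nat => (r, c + (i : Int)))).filter
          (fun rc => PySem.List.pyGetD (PySem.List.pyGetD plateau rc.1 []) rc.2 "_" != "_") := by
  induction letters generalizing c with
  | nil => simp [pvScan]
  | cons x tl ih =>
      simp only [pvScan, List.length_cons, List.range_succ_eq_map, List.map_cons, List.map_map,
        List.filter_cons, String.reduceEq, reduceIte, Nat.cast_zero, add_zero]
      rw [ih (c + 1)]
      have : ((List.range tl.length).map (fun i : Nat => (r, c + 1 + (i : Int))))
           = ((List.range tl.length).map ((fun i : Nat => (r, c + (i : Int))) ∘ Nat.succ)) := by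
        refine List.map_congr_left (fun a _ => ?_)
        simp [Function.comp]; push_cast; ring
      rw [this]

-- ===== VERDICT (by name: the statement is the Claim_ definition above) =====
theorem localisation_lettre_sur_plateau_spec : Claim_equal_localisation_lettre_sur_plateau := by
  intro coup plateau _ _
  unfold Spec_localisation_lettre_sur_plateau
  obtain ⟨mot, ⟨line, column⟩, direc⟩ := coup
  by_cases hV : direc = "V"
  · simp only [localisation_lettre_sur_plateau, localisation_lettre_sur_plateau_alt, hV, ne_eq,
      not_true_eq_false, false_and, reduceIte]
    rw [pvScanV]
    exact (pvLoopEq (fun i => (line + (i : Int), column))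
        (fun rc => PySem.List.pyGetD (PySem.List.pyGetD plateau rc.1 []) rc.2 "_" != "_")
        (List.range mot.toList.length) []).trans (by rw [List.nil_append])
  · by_cases hH : direc = "H"
    · simp only [localisation_lettre_sur_plateau, localisation_lettre_sur_plateau_alt, hH,
        String.reduceEq, ne_eq, not_false_eq_true, not_true_eq_false, and_false, reduceIte]
      rw [pvScanH]
      exact (pvLoopEq (fun i => (line, column + (i : Int)))
        (fun rc => PySem.List.pyGetD (PySem.List.pyGetD plateau rc.1 []) rc.2 "_" != "_")
        (List.range mot.toList.length) []).trans (by rw [List.nil_append])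
    · simp [localisation_lettre_sur_plateau, localisation_lettre_sur_plateau_alt, hV, hH]
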